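-- pv_equiv track=rewrite | github.com/gabriellaec/desoft-analise-exercicios | backup/user_335/ch92_2019_10_02_17_57_02_744013.py | Munchhausen
-- ===== SOURCE A (Python) =====
-- def Munchhausen (numero): #Criar uma função para verificar munchhausen
--     if numero < 1: #Desconsiderando numeros que 1
--         return False
--
--     else:  #Verificar se é munchhausen
--         nString = str(numero) #Transformando o numero em string
--         listaElevados = [] #Lista
--         soma = 0 #Soma dos valores da lista
--
--         for n in nString: #Percorrendo os digitos do numero
--             elevado = int(n) ** int(n) #Transformando string em numero e elevando pelo seu valor
--             listaElevados.append(elevado) #Adicionando o resultado na lista de elevados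
--
--         i = 0
--         while i < len(listaElevados): #percorrendo a lista dos digitos elevados
--             soma += listaElevados[i] #somando o elevado com o valor anterior de soma
--             i += 1 #incrementando 1 ao indicie
--
--         return soma == numero #Retorna em Booleano se é ou não um número de Munchhausen
-- ===== SOURCE B (Python) =====
-- def Munchhausen(numero):
--     if numero < 1:
--         return False
--     n = numero
--     soma = 0
--     while n > 0:
--         d = n % 10
--         soma += d ** d
--         n //= 10
--     return soma == numero
-- ===== Notes on version B (the rewrite author's own statement) =====
-- stated objective: idiomatic
-- what changed: Replaces the string conversion, the intermediate list of powers and the index-based summing loop with a single arithmetic loop extracting digits via n % 10 and n //= 10.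
import Mathlib
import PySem

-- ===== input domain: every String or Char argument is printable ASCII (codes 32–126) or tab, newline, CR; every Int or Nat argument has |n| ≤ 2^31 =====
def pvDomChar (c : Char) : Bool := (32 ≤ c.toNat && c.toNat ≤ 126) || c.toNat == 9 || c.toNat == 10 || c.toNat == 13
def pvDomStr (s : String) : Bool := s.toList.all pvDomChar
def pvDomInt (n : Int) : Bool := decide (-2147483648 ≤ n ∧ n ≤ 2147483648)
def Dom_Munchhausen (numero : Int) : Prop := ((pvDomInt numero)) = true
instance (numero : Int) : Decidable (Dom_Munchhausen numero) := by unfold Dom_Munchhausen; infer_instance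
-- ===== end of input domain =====

-- B replaces A's string conversion, intermediate list and index loop with one arithmetic
-- digit loop (n % 10 / n //= 10); idiomatic, same O(number of digits) cost.


-- ===== PORT A =====
-- int(n) for the single digit character n of str(numero); ofChars? is `some` on every
-- character str(·) produces for numero ≥ 1, so the getD default is never taken.
def pvDigitVal (c : Char) : Int := (PySem.Int.ofChars? [c]).getD 0

def Munchhausen (numero : Int) : Bool :=
  if numero < 1 then false
  else
    -- nString = str(numero)  (worked with as its character list, PySem.Int.toChars)
    let nString : List Char := PySem.Int.toChars numero
    -- for n in nString: listaElevados.append(int(n) ** int(n))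
    let listaElevados : List Int :=
      nString.foldl (fun acc c => acc ++ [pvDigitVal c ^ (pvDigitVal c).toNat]) []
    -- while i < len(listaElevados): soma += listaElevados[i]; i += 1
    let soma : Int := listaElevados.foldl (fun soma x => soma + x) 0
    soma == numero

-- ===== PORT B =====
-- while n > 0: d = n % 10; soma += d ** d; n //= 10
def pvAltLoop (n : Int) (soma : Int) : Int :=
  if h : 0 < n then
    let d := PySem.Int.mod n 10
    pvAltLoop (PySem.Int.floordiv n 10) (soma + d ^ d.toNat)
  else soma
termination_by n.toNat
decreasing_by
  have hm : n = (n.toNat : Int) := (Int.toNat_of_nonneg h.le).symm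
  have hfd : PySem.Int.floordiv n 10 = ((n.toNat / 10 : Nat) : Int) := by
    rw [hm]; exact_mod_cast PySem.Int.floordiv_natCast n.toNat 10
  rw [hfd]
  simp only [Int.toNat_natCast]
  exact Nat.div_lt_self (by omega) (by norm_num)

def Munchhausen_alt (numero : Int) : Bool :=
  if numero < 1 then false
  else pvAltLoop numero 0 == numero

-- ===== PRECONDITION & SPEC =====
def Spec_Munchhausen (numero : Int) (out : Bool) : Prop := out = Munchhausen_alt numero
instance (numero : Int) (out : Bool) : Decidable (Spec_Munchhausen numero out) := by unfold Spec_Munchhausen; infer_instance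

-- ===== CLAIM (what is proved, stated in full; the proofs are below) =====
def Claim_equal_Munchhausen : Prop := ∀ (numero : Int), Dom_Munchhausen numero → Spec_Munchhausen numero (Munchhausen numero)

-- ===== LEMMAS AND PROOFS =====

-- the digit-power sum both programs compute, as a function of the Nat value
def pvDigPow (n : Nat) : Int :=
  if h : n = 0 then 0
  else ((n % 10 : Nat) : Int) ^ (n % 10) + pvDigPow (n / 10)
termination_by n
decreasing_by exact Nat.div_lt_self (Nat.pos_of_ne_zero h) (by norm_num)

theorem pvDigitVal_digitChar (k : Nat) (hk : k < 10) :
    pvDigitVal (Nat.digitChar k) ^ (pvDigitVal (Nat.digitChar k)).toNat = ((k : Int)) ^ k := by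
  interval_cases k <;> decide

theorem pvSumChars_toDigitsCore (fuel : Nat) :
    ∀ (n : Nat) (ds : List Char), 0 < n → n ≤ fuel →
    ((Nat.toDigitsCore 10 fuel n ds).map
        (fun c => pvDigitVal c ^ (pvDigitVal c).toNat)).sum
      = pvDigPow n + ((ds.map (fun c => pvDigitVal c ^ (pvDigitVal c).toNat)).sum) := by
  induction fuel with
  | zero => intro n ds hn hle; omega
  | succ fuel ih =>
    intro n ds hn hle
    rw [Nat.toDigitsCore]
    have hk : n % 10 < 10 := Nat.mod_lt _ (by norm_num)
    by_cases hdiv : n / 10 = 0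
    · rw [if_pos hdiv, List.map_cons, List.sum_cons]
      rw [pvDigitVal_digitChar _ hk]
      rw [pvDigPow, dif_neg (by omega), hdiv, pvDigPow]
      simp [add_comm]
    · rw [if_neg hdiv]
      rw [ih (n / 10) _ (Nat.pos_of_ne_zero hdiv)
          (by
            have := Nat.div_lt_self hn (by norm_num : 1 < 10)
            omega)]
      simp only [List.map_cons, List.sum_cons]
      rw [pvDigitVal_digitChar _ hk]
      conv_rhs => rw [pvDigPow, dif_neg (by omega)]
      ring

theorem pvAltLoop_eq (m : Nat) : ∀ soma : Int, pvAltLoop (m : Int) soma = soma + pvDigPow m := by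
  induction m using Nat.strong_induction_on with
  | _ m ih =>
    intro soma
    rw [pvAltLoop]
    by_cases hm : 0 < (m : Int)
    · rw [dif_pos hm]
      have hm' : 0 < m := by exact_mod_cast hm
      have hmod : PySem.Int.mod (m : Int) 10 = ((m % 10 : Nat) : Int) := by
        exact_mod_cast PySem.Int.mod_natCast m 10
      have hdiv : PySem.Int.floordiv (m : Int) 10 = ((m / 10 : Nat) : Int) := by
        exact_mod_cast PySem.Int.floordiv_natCast m 10
      rw [hmod, hdiv, ih (m / 10) (Nat.div_lt_self hm' (by norm_num))]
      conv_rhs => rw [pvDigPow, dif_neg (by omega)]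
      rw [Int.toNat_natCast]
      push_cast
      ring
    · rw [dif_neg hm]
      have : m = 0 := by omega
      subst this
      rw [pvDigPow]; simp

theorem pvFoldlAdd (xs : List Int) : ∀ s : Int, xs.foldl (fun soma x => soma + x) s = s + xs.sum := by
  induction xs with
  | nil => simp
  | cons x xs ih => intro s; simp [List.foldl_cons, ih, add_assoc]

theorem Munchhausen_spec : Claim_equal_Munchhausen := by
  intro numero _
  unfold Spec_Munchhausen Munchhausen Munchhausen_alt
  by_cases hlt : numero < 1
  · simp [hlt]
  · rw [if_neg hlt, if_neg hlt]
    dsimp only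
    have h1 : (1:Int) ≤ numero := by omega
    have hA : PySem.Int.toChars numero = Nat.toDigits 10 numero.toNat := by
      unfold PySem.Int.toChars
      rw [if_neg (by omega)]
    rw [PySem.List.foldl_append_singleton_eq_map, pvFoldlAdd, hA]
    have hm : numero.toNat = numero := Int.toNat_of_nonneg (by omega)
    have hpos : 0 < numero.toNat := by omega
    unfold Nat.toDigits
    simp only [List.nil_append, zero_add]
    rw [pvSumChars_toDigitsCore (numero.toNat + 1) numero.toNat [] hpos (by omega)]
    conv_rhs => rw [← hm, pvAltLoop_eq numero.toNat 0]
    rw [hm]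
    simp
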